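-- pv_equiv track=rewrite | github.com/GordonBreazz/CODEWARS | Python/7kyu--Char-Code-Calculation.py | calc
-- ===== SOURCE A (Python) =====
-- def calc(x):
--     # your code here
--     st, n, m = '', 0, 0
--     for item in x:
--         st += str(ord(item))
--     for item in st:
--         p = int(item)
--         n += p
--         if p == 7 : p = 1
--         m += p
--     return n - m
-- ===== SOURCE B (Python) =====
-- def calc(x):
--     s = ''.join(str(ord(c)) for c in x)
--     return 6 * s.count('7')
-- ===== Notes on version B (the rewrite author's own statement) =====
-- stated objective: simpler
-- what changed: Replaces A's two per-digit accumulating sums (sum of all digits and sum with 7 mapped to 1, then subtracted) by the closed form 6 * (number of '7' digits), since each digit contributes 6 to the difference exactly when it is 7.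
import Mathlib
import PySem

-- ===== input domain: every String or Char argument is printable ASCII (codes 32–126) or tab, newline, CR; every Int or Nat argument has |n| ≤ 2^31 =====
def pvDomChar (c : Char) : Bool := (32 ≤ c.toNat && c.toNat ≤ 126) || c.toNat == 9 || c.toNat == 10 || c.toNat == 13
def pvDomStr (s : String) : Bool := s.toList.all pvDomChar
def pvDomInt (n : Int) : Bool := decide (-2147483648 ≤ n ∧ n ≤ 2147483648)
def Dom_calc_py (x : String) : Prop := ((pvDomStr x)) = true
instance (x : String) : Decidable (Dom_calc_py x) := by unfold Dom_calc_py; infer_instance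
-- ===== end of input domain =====

-- ===== PORT A =====
-- int(item): Python never raises here since st holds only decimal digits; getD 0 is unreachable
def pvIntOfDigit (c : Char) : Int := (PySem.Int.ofChars? [c]).getD 0

def calc_py (x : String) : Int :=
  let st : List Char := x.toList.foldl (fun st c => st ++ PySem.Int.toChars (c.toNat : Int)) []
  let nm : Int × Int := st.foldl (fun nm item =>
    let p := pvIntOfDigit item
    let n := nm.1 + p
    let p := if p = 7 then (1 : Int) else p
    (n, nm.2 + p)) (0, 0)
  nm.1 - nm.2

-- ===== PORT B =====
def calc_py_alt (x : String) : Int :=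
  let s : List Char := PySem.Chars.join [] (x.toList.map (fun c => PySem.Int.toChars (c.toNat : Int)))
  6 * (PySem.Chars.count s ['7'] : Int)

-- ===== PRECONDITION & SPEC =====
def Spec_calc_py (x : String) (out : Int) : Prop := out = calc_py_alt x
instance (x : String) (out : Int) : Decidable (Spec_calc_py x out) := by unfold Spec_calc_py; infer_instance

-- ===== CLAIM (what is proved, stated in full; the proofs are below) =====
def Claim_equal_calc_py : Prop := ∀ (x : String), Dom_calc_py x → Spec_calc_py x (calc_py x)

-- ===== LEMMAS AND PROOFS =====


-- single-char count is List.count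
lemma count_go_single (a : Char) : ∀ (fuel : Nat) (l : List Char) (acc : Nat),
    l.length ≤ fuel → PySem.Chars.count.go [a] fuel l acc = acc + l.count a := by
  intro fuel
  induction fuel with
  | zero => intro l acc h; cases l with
    | nil => simp [PySem.Chars.count.go]
    | cons c t => simp at h
  | succ n ih =>
    intro l acc h
    cases l with
    | nil => simp [PySem.Chars.count.go]
    | cons c t =>
      simp only [PySem.Chars.count.go, List.isPrefixOf, List.count_cons]
      by_cases hc : c = a
      · simp [hc, ih t (acc+1) (by simpa using h)]; omega
      · simp [hc, Ne.symm hc, ih t acc (by simpa using h)]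

lemma count_single (a : Char) (l : List Char) :
    PySem.Chars.count l [a] = l.count a := by
  simpa using count_go_single a l.length l 0 le_rfl

-- the A-side string-building fold is a flatten
lemma stA_eq (ys : List Char) (acc : List Char) :
    ys.foldl (fun st c => st ++ PySem.Int.toChars (c.toNat : Int)) acc
      = acc ++ (ys.map (fun c => PySem.Int.toChars (c.toNat : Int))).flatten := by
  induction ys generalizing acc with
  | nil => simp
  | cons c t ih => simp [ih, List.append_assoc]

lemma intersperse_nil_flatten (parts : List (List Char)) :
    (List.intersperse ([] : List Char) parts).flatten = parts.flatten := by
  induction parts with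
  | nil => rfl
  | cons p ps ih =>
    cases ps with
    | nil => rfl
    | cons q qs =>
      simp only [List.intersperse, List.flatten_cons] at ih ⊢
      rw [ih]
      simp

lemma join_nil_eq_flatten (parts : List (List Char)) :
    PySem.Chars.join [] parts = parts.flatten := by
  simp only [PySem.Chars.join, List.intercalate]
  exact intersperse_nil_flatten parts

-- on every digit char that toChars produces for a code below 127, the parse gives 7 iff the char is '7'
set_option maxRecDepth 4096 in
lemma digit_table : ((List.range 127).all fun k =>
    (PySem.Int.toChars ((k : Int))).all fun c =>
      ((pvIntOfDigit c == 7) == (c == '7'))) = true := by decide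

lemma digit_seven : ∀ k : Nat, k < 127 → ∀ c ∈ PySem.Int.toChars ((k : Int)),
    (pvIntOfDigit c = 7 ↔ c = '7') := by
  intro k hk c hc
  have h := List.all_eq_true.mp digit_table k (List.mem_range.mpr hk)
  simp only [List.all_eq_true] at h
  have h2 := h c hc
  simpa using h2

-- the A-side pair fold, assuming every char satisfies the 7-characterisation
lemma pairfold (cs : List Char)
    (h : ∀ c ∈ cs, (pvIntOfDigit c = 7 ↔ c = '7')) : ∀ (a b : Int),
    (cs.foldl (fun nm item =>
      (nm.1 + pvIntOfDigit item, nm.2 + if pvIntOfDigit item = 7 then (1 : Int) else pvIntOfDigit item)) (a, b)).1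
    - (cs.foldl (fun nm item =>
      (nm.1 + pvIntOfDigit item, nm.2 + if pvIntOfDigit item = 7 then (1 : Int) else pvIntOfDigit item)) (a, b)).2
    = a - b + 6 * (cs.count '7' : Int) := by
  induction cs with
  | nil => intro a b; simp
  | cons c t ih =>
    intro a b
    have hc := h c (List.mem_cons_self ..)
    have ht : ∀ c ∈ t, (pvIntOfDigit c = 7 ↔ c = '7') := fun d hd => h d (List.mem_cons_of_mem _ hd)
    by_cases h7 : c = '7'
    · subst h7
      have hp : pvIntOfDigit '7' = 7 := hc.mpr rfl
      simp only [List.foldl_cons, hp, ih ht, List.count_cons_self]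
      push_cast; ring
    · have hp : pvIntOfDigit c ≠ 7 := fun e => h7 (hc.mp e)
      simp only [List.foldl_cons, if_neg hp, ih ht, List.count_cons_of_ne h7]
      ring

-- ===== VERDICT =====
theorem calc_py_spec : Claim_equal_calc_py := by
  intro x hdom
  unfold Spec_calc_py calc_py calc_py_alt
  simp only [stA_eq, join_nil_eq_flatten, List.nil_append, count_single]
  have hmem : ∀ c ∈ (x.toList.map (fun c => PySem.Int.toChars ((c.toNat : Int)))).flatten,
      (pvIntOfDigit c = 7 ↔ c = '7') := by
    intro c hc
    rcases List.mem_flatten.mp hc with ⟨l, hl, hcl⟩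
    rcases List.mem_map.mp hl with ⟨d, hd, rfl⟩
    have hdc : pvDomChar d = true := by
      have := (List.all_eq_true.mp hdom) d hd
      simpa using this
    have hk : d.toNat < 127 := by
      simp [pvDomChar] at hdc
      omega
    exact digit_seven d.toNat hk c hcl
  have := pairfold _ hmem 0 0
  simpa using this
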